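-- pv_equiv track=rewrite | github.com/IsauraCG/M3_Ejercicios | M3_Consolidacion_Filtrando datos/fiktrando_datos_alt2.py | creacion_diccionario
-- ===== SOURCE A (Python) =====
-- def creacion_diccionario(lista, magos, cientificos, otros):
--     """ Función que retorna un diccionario con los elementos originales """
--     for nombre in lista:
--         if nombre in ['Harry Houdini', 'David Blaine', 'Teller']:
--             magos.append(nombre)
--         elif nombre in ['Newton', 'Hawking', 'Einstein']:
--             cientificos.append(nombre)
--         else:
--             otros.append(nombre)
--     diccionario_nombres = {'Magos': magos,
--                            'Cientificos': cientificos, 'Otros': otros}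
--     return diccionario_nombres
-- ===== SOURCE B (Python) =====
-- MAGOS_SET = {'Harry Houdini', 'David Blaine', 'Teller'}
-- CIENTIFICOS_SET = {'Newton', 'Hawking', 'Einstein'}
--
-- def creacion_diccionario(lista, magos, cientificos, otros):
--     """Three separate passes: each bucket is extended with its own filter of lista."""
--     magos.extend(n for n in lista if n in MAGOS_SET)
--     cientificos.extend(n for n in lista if n in CIENTIFICOS_SET)
--     otros.extend(n for n in lista if n not in MAGOS_SET and n not in CIENTIFICOS_SET)
--     return {'Magos': magos, 'Cientificos': cientificos, 'Otros': otros}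
-- ===== Notes on version B (the rewrite author's own statement) =====
-- stated objective: alternative
-- what changed: Replaces A's single pass with a three-branch conditional by three independent filtering passes over lista, one per bucket, each extending the corresponding argument list.
import Mathlib
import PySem

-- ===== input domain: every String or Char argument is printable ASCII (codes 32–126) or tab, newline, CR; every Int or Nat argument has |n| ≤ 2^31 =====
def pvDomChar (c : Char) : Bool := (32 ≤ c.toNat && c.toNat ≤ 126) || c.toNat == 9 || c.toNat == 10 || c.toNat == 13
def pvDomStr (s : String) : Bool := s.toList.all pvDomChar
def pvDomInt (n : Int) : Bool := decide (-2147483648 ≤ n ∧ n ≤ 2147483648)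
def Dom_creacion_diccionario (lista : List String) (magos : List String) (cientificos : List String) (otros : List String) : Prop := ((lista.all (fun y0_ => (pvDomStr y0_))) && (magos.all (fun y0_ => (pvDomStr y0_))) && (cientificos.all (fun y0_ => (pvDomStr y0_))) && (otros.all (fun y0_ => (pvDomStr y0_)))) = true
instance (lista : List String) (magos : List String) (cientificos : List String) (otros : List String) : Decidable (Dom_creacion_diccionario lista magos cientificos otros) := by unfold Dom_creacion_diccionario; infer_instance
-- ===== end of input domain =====

-- ===== PORT A =====
-- one honest line: B classifies by three independent filtering passes instead of A's single pass
-- with a three-way branch; same cost, different decomposition. Return-value equivalence only: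
-- both Pythons mutate the argument lists in place (A appends per element, B extends per bucket).
def creacion_diccionario (lista : List String) (magos : List String) (cientificos : List String) (otros : List String) : List (String × List String) :=
  let s := lista.foldl (fun (s : List String × List String × List String) nombre =>
    if nombre ∈ ["Harry Houdini", "David Blaine", "Teller"] then
      (s.1 ++ [nombre], s.2.1, s.2.2)
    else if nombre ∈ ["Newton", "Hawking", "Einstein"] then
      (s.1, s.2.1 ++ [nombre], s.2.2)
    else
      (s.1, s.2.1, s.2.2 ++ [nombre])) (magos, cientificos, otros)
  [("Magos", s.1), ("Cientificos", s.2.1), ("Otros", s.2.2)]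

-- ===== PORT B =====
def pvMagosSet : PySem.Set String := PySem.Set.ofList ["Harry Houdini", "David Blaine", "Teller"]
def pvCientificosSet : PySem.Set String := PySem.Set.ofList ["Newton", "Hawking", "Einstein"]

def creacion_diccionario_alt (lista : List String) (magos : List String) (cientificos : List String) (otros : List String) : List (String × List String) :=
  [("Magos", magos ++ lista.filter (fun n => pvMagosSet.contains n)),
   ("Cientificos", cientificos ++ lista.filter (fun n => pvCientificosSet.contains n)),
   ("Otros", otros ++ lista.filter (fun n => !pvMagosSet.contains n && !pvCientificosSet.contains n))]

-- ===== PRECONDITION & SPEC =====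
def Spec_creacion_diccionario (lista : List String) (magos : List String) (cientificos : List String) (otros : List String) (out : List (String × List String)) : Prop := out = creacion_diccionario_alt lista magos cientificos otros
instance (lista : List String) (magos : List String) (cientificos : List String) (otros : List String) (out : List (String × List String)) : Decidable (Spec_creacion_diccionario lista magos cientificos otros out) := by unfold Spec_creacion_diccionario; infer_instance

-- ===== CLAIM (what is proved, stated in full; the proofs are below) =====
def Claim_equal_creacion_diccionario : Prop := ∀ (lista : List String) (magos : List String) (cientificos : List String) (otros : List String), Dom_creacion_diccionario lista magos cientificos otros → Spec_creacion_diccionario lista magos cientificos otros (creacion_diccionario lista magos cientificos otros)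

-- ===== LEMMAS AND PROOFS =====

-- ===== VERDICT (by name: the statement is the Claim_ definition above) =====
lemma pvMagosSet_eq : pvMagosSet = ["Harry Houdini", "David Blaine", "Teller"] := by decide

lemma pvCientificosSet_eq : pvCientificosSet = ["Newton", "Hawking", "Einstein"] := by decide

lemma fold_characterization (lista m c o : List String) :
    lista.foldl (fun (s : List String × List String × List String) nombre =>
      if nombre ∈ ["Harry Houdini", "David Blaine", "Teller"] then
        (s.1 ++ [nombre], s.2.1, s.2.2)
      else if nombre ∈ ["Newton", "Hawking", "Einstein"] then
        (s.1, s.2.1 ++ [nombre], s.2.2)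
      else
        (s.1, s.2.1, s.2.2 ++ [nombre])) (m, c, o)
    = (m ++ lista.filter (fun n => decide (n ∈ ["Harry Houdini", "David Blaine", "Teller"])),
       c ++ lista.filter (fun n => decide (n ∈ ["Newton", "Hawking", "Einstein"])),
       o ++ lista.filter (fun n => !decide (n ∈ ["Harry Houdini", "David Blaine", "Teller"])
                                   && !decide (n ∈ ["Newton", "Hawking", "Einstein"]))) := by
  induction lista generalizing m c o with
  | nil => simp
  | cons hd tl ih =>
    simp only [List.foldl_cons]
    by_cases h1 : hd ∈ ["Harry Houdini", "David Blaine", "Teller"]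
    · have h1' := h1
      simp only [List.mem_cons, List.not_mem_nil, or_false] at h1'
      rw [if_pos h1, ih]
      rcases h1' with rfl | rfl | rfl <;> simp [List.filter_cons, List.append_assoc]
    · by_cases h2 : hd ∈ ["Newton", "Hawking", "Einstein"]
      · have h2' := h2
        simp only [List.mem_cons, List.not_mem_nil, or_false] at h2'
        rw [if_neg h1, if_pos h2, ih]
        rcases h2' with rfl | rfl | rfl <;> simp [List.filter_cons, List.append_assoc]
      · rw [if_neg h1, if_neg h2, ih]
        simp only [List.mem_cons, List.not_mem_nil, or_false, not_or] at h1 h2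
        obtain ⟨a1, a2, a3⟩ := h1
        obtain ⟨b1, b2, b3⟩ := h2
        simp [List.filter_cons, a1, a2, a3, b1, b2, b3, List.append_assoc]

theorem creacion_diccionario_spec : Claim_equal_creacion_diccionario := by
  intro lista magos cientificos otros _
  unfold Spec_creacion_diccionario creacion_diccionario creacion_diccionario_alt
  rw [fold_characterization]
  simp only [pvMagosSet_eq, pvCientificosSet_eq]
  simp [PySem.Set.contains]
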